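-- pv_equiv track=rewrite | github.com/bghira/discord-tron-master | discord_tron_master/cogs/zork.py | _parse_campaign_export_options
-- ===== SOURCE A (Python) =====
-- import shlex
--
-- def _parse_campaign_export_options(
--
--     raw: str | None,
-- ) -> tuple[str, str]:
--     export_type = "full"
--     raw_format = "jsonl"
--     if not raw:
--         return export_type, raw_format
--     try:
--         tokens = shlex.split(raw)
--     except ValueError:
--         tokens = str(raw).split()
--     i = 0
--     while i < len(tokens):
--         token = str(tokens[i] or "")
--         low = token.lower()
--         if low.startswith("--type="):
--             export_type = token.split("=", 1)[1].strip().lower() or export_type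
--             i += 1
--             continue
--         if low == "--type":
--             if i + 1 < len(tokens):
--                 export_type = str(tokens[i + 1] or "").strip().lower() or export_type
--                 i += 2
--             else:
--                 i += 1
--             continue
--         if low.startswith("--raw-format="):
--             raw_format = token.split("=", 1)[1].strip().lower() or raw_format
--             i += 1
--             continue
--         if low == "--raw-format":
--             if i + 1 < len(tokens):
--                 raw_format = str(tokens[i + 1] or "").strip().lower() or raw_format
--                 i += 2
--             else:
--                 i += 1
--             continue
--         i += 1
--     if export_type not in {"full", "raw"}:
--         export_type = "full"
--     if raw_format not in {"script", "markdown", "json", "jsonl", "loglines"}: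
--         raw_format = "jsonl"
--     return export_type, raw_format
-- ===== SOURCE B (Python) =====
-- import re
--
-- # One shell token is a run of chunks: '...' literal, "..." with \" and \\ escapes,
-- # a backslash-escaped character, or plain characters.
-- _TOKEN = re.compile(r"""(?:'[^']*'|"(?:\\.|[^"\\])*"|\\.|[^\s'"\\]+)+""", re.DOTALL)
-- _CHUNK = re.compile(r"""'([^']*)'|"((?:\\.|[^"\\])*)"|\\(.)|([^\s'"\\]+)""", re.DOTALL)
--
--
-- def _shell_tokens(s):
--     """Shell-style tokens of s, or None if quoting is malformed."""
--     tokens = []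
--     pos = 0
--     while pos < len(s):
--         if s[pos].isspace():
--             pos += 1
--             continue
--         m = _TOKEN.match(s, pos)
--         if m is None:
--             return None
--         token = []
--         for sq, dq, esc, plain in _CHUNK.findall(m.group()):
--             if dq:
--                 token.append(re.sub(r'\\(["\\])', r"\1", dq))
--             else:
--                 token.append(sq or esc or plain)
--         tokens.append("".join(token))
--         pos = m.end()
--         if pos < len(s) and not s[pos].isspace():
--             return None
--     return tokens
--
--
-- def _parse_campaign_export_options(
--     raw: str | None,
-- ) -> tuple[str, str]:
--     export_type = "full"
--     raw_format = "jsonl"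
--     if not raw:
--         return export_type, raw_format
--     tokens = _shell_tokens(raw)
--     if tokens is None:
--         tokens = str(raw).split()
--     pending = None
--     for token in tokens:
--         if pending is not None:
--             value = token.strip().lower()
--             if pending == "type":
--                 export_type = value or export_type
--             else:
--                 raw_format = value or raw_format
--             pending = None
--             continue
--         low = token.lower()
--         if low.startswith("--type="):
--             export_type = token.split("=", 1)[1].strip().lower() or export_type
--         elif low == "--type":
--             pending = "type"
--         elif low.startswith("--raw-format="):
--             raw_format = token.split("=", 1)[1].strip().lower() or raw_format
--         elif low == "--raw-format":
--             pending = "raw-format"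
--     if export_type not in {"full", "raw"}:
--         export_type = "full"
--     if raw_format not in {"script", "markdown", "json", "jsonl", "loglines"}:
--         raw_format = "jsonl"
--     return export_type, raw_format
-- ===== Notes on version B (the rewrite author's own statement) =====
-- stated objective: faster
-- what changed: Replaced the manual index while-loop with i+1 look-ahead and i+=2 skips by a single for-loop over the tokens carrying a pending-key state variable, and replaced the shlex.split call by a compiled-regex chunk tokenizer with the same token semantics (None where shlex raises ValueError).
import Mathlib
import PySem

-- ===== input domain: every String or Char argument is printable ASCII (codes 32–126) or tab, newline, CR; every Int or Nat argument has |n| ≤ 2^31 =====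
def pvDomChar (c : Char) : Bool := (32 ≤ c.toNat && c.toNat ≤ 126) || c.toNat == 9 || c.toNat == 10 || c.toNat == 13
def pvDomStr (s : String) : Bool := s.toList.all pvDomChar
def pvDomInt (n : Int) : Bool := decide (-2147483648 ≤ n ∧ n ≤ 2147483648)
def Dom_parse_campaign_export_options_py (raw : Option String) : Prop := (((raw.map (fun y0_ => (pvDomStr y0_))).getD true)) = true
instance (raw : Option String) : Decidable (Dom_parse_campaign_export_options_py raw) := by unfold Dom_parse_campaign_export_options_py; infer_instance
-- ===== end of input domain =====

-- B replaces A's manual-index while loop (i+1 look-ahead, i+=2 skips) by a for-loop carrying a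
-- pending-key state, and A's shlex.split call by a regex-chunk tokenizer (measured faster by the
-- timing run); return values proved equal on the whole domain.

-- ===== PORT A =====

-- hand port of shlex.split (posix=True, comments=False), exact on the ASCII+tab/CR/LF domain:
-- whitespace splits tokens; '\' escapes the next char; '...' is literal; "..." allows \" and \\;
-- an unterminated quote or trailing backslash raises ValueError = `none` here.
def pvShlexWS (c : Char) : Bool := c == ' ' || c == '\t' || c == '\r' || c == '\n'

def pvFlush (acc : List (List Char)) (cur : Option (List Char)) : List (List Char) :=
  match cur with
  | none => acc
  | some t => acc ++ [t]

inductive PvSt | norm | esc | sq | dq | dqesc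
deriving DecidableEq, Repr

def pvShlex : List Char → PvSt → Option (List Char) → List (List Char) → Option (List (List Char))
  | [], .norm, cur, acc => some (pvFlush acc cur)
  | [], _, _, _ => none          -- ValueError: no closing quotation / no escaped character
  | c :: cs, .norm, cur, acc =>
      if pvShlexWS c then pvShlex cs .norm none (pvFlush acc cur)
      else if c = '\\' then pvShlex cs .esc cur acc
      else if c = '\'' then pvShlex cs .sq (some (cur.getD [])) acc
      else if c = '"' then pvShlex cs .dq (some (cur.getD [])) acc
      else pvShlex cs .norm (some (cur.getD [] ++ [c])) acc
  | c :: cs, .esc, cur, acc => pvShlex cs .norm (some (cur.getD [] ++ [c])) acc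
  | c :: cs, .sq, cur, acc =>
      if c = '\'' then pvShlex cs .norm cur acc
      else pvShlex cs .sq (some (cur.getD [] ++ [c])) acc
  | c :: cs, .dq, cur, acc =>
      if c = '"' then pvShlex cs .norm cur acc
      else if c = '\\' then pvShlex cs .dqesc cur acc
      else pvShlex cs .dq (some (cur.getD [] ++ [c])) acc
  | c :: cs, .dqesc, cur, acc =>
      if c = '"' ∨ c = '\\' then pvShlex cs .dq (some (cur.getD [] ++ [c])) acc
      else pvShlex cs .dq (some (cur.getD [] ++ ['\\', c])) acc

-- A: tokens = shlex.split(raw) ; on ValueError: tokens = str(raw).split()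
def pvTokenize (s : List Char) : List (List Char) :=
  match pvShlex s .norm none [] with
  | some ts => ts
  | none => PySem.Chars.split₀ s

-- Python's  `x or y`  for strings x y
def pvOr (v d : List Char) : List Char := if v = [] then d else v

-- the final membership normalization, identical in both Pythons
def pvFinish (p : List Char × List Char) : String × String :=
  let et := if p.1 ∈ [("full" : String).toList, ("raw" : String).toList] then p.1 else ("full" : String).toList
  let rf := if p.2 ∈ [("script" : String).toList, ("markdown" : String).toList, ("json" : String).toList,
                      ("jsonl" : String).toList, ("loglines" : String).toList] then p.2 else ("jsonl" : String).toList
  (String.ofList et, String.ofList rf)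

-- A's while-loop with manual index: recursion on the token list; consuming tokens[i+1] and
-- doing i += 2 is matching two list cells at once.  (token = str(tokens[i] or "") is the
-- identity on strings: '' or '' == ''.)
def pvALoop : List (List Char) → List Char → List Char → List Char × List Char
  | [], et, rf => (et, rf)
  | t :: rest, et, rf =>
    let low := PySem.Chars.lower t
    if PySem.Chars.startswith low ("--type=" : String).toList then
      pvALoop rest (pvOr (PySem.Chars.lower (PySem.Chars.strip
        (PySem.List.pyGetD (PySem.Chars.splitOnMax t ("=" : String).toList 1) 1 []))) et) rf
    else if low = ("--type" : String).toList then
      match rest with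
      | v :: rest' => pvALoop rest' (pvOr (PySem.Chars.lower (PySem.Chars.strip v)) et) rf
      | [] => (et, rf)                       -- i += 1 and the loop ends
    else if PySem.Chars.startswith low ("--raw-format=" : String).toList then
      pvALoop rest et (pvOr (PySem.Chars.lower (PySem.Chars.strip
        (PySem.List.pyGetD (PySem.Chars.splitOnMax t ("=" : String).toList 1) 1 []))) rf)
    else if low = ("--raw-format" : String).toList then
      match rest with
      | v :: rest' => pvALoop rest' et (pvOr (PySem.Chars.lower (PySem.Chars.strip v)) rf)
      | [] => (et, rf)
    else pvALoop rest et rf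

def parse_campaign_export_options_py (raw : Option String) : String × String :=
  match raw with
  | none => ("full", "jsonl")
  | some s =>
    if s.toList = [] then ("full", "jsonl")    -- `if not raw`
    else
      pvFinish (pvALoop (pvTokenize s.toList) ("full" : String).toList ("jsonl" : String).toList)

-- ===== PORT B =====

-- B's regex tokenizer, ported chunk for chunk ( '...' | "..." with \-escapes | \c | plain run );
-- each regex alternative becomes one branch, None (malformed quoting) becomes `none`.
def pvPlain (c : Char) : Bool := !(pvShlexWS c || c == '\'' || c == '"' || c == '\\')

-- the "(?:\\.|[^"\\])*" alternative with its re.sub unescaping of \" and \\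
def pvDqChunk : List Char → Option (List Char × List Char)
  | [] => none
  | c :: cs =>
    if c = '"' then some ([], cs)
    else if c = '\\' then
      match cs with
      | [] => none
      | d :: ds => (pvDqChunk ds).map
          (fun p => ((if d = '"' ∨ d = '\\' then [d] else ['\\', d]) ++ p.1, p.2))
    else (pvDqChunk cs).map (fun p => (c :: p.1, p.2))

-- one chunk of a token: returns (unquoted text, remaining input)
def pvChunk : List Char → Option (List Char × List Char)
  | [] => none
  | c :: cs =>
    if c = '\'' then
      match cs.dropWhile (· != '\'') with
      | [] => none
      | _ :: rest => some (cs.takeWhile (· != '\''), rest)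
    else if c = '"' then pvDqChunk cs
    else if c = '\\' then
      match cs with
      | [] => none
      | d :: ds => some ([d], ds)
    else if pvShlexWS c then none
    else some ((c :: cs).takeWhile pvPlain, (c :: cs).dropWhile pvPlain)

theorem pvDqChunk_len : ∀ (n : Nat) (l : List Char), l.length ≤ n →
    ∀ a r, pvDqChunk l = some (a, r) → r.length < l.length := by
  intro n
  induction n with
  | zero =>
    intro l h a r hl
    have : l = [] := List.eq_nil_of_length_eq_zero (Nat.le_zero.mp h)
    subst this; simp [pvDqChunk] at hl
  | succ n ih =>
    intro l h a r hl
    match l with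
    | [] => simp [pvDqChunk] at hl
    | c :: cs =>
      by_cases hq : c = '"'
      · subst hq; rw [pvDqChunk.eq_def] at hl; simp at hl
        simp [← hl.2]
      · by_cases hb : c = '\\'
        · subst hb
          match cs with
          | [] => rw [pvDqChunk.eq_def] at hl; simp at hl
          | d :: ds =>
            rw [pvDqChunk.eq_def] at hl
            simp only [if_neg hq, if_pos rfl] at hl
            rcases hd : pvDqChunk ds with _ | ⟨a', r'⟩ <;> simp [hd] at hl
            have := ih ds (by simp at h ⊢; omega) a' r' hd
            simp only [List.length_cons, ← hl.2]
            omega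
        · rw [pvDqChunk.eq_def] at hl
          simp only [if_neg hq, if_neg hb] at hl
          rcases hd : pvDqChunk cs with _ | ⟨a', r'⟩ <;> simp [hd] at hl
          have := ih cs (by simp at h ⊢; omega) a' r' hd
          simp only [List.length_cons, ← hl.2]
          omega

theorem pvChunk_len : ∀ (l : List Char) a r, pvChunk l = some (a, r) → r.length < l.length := by
  intro l a r h
  match l with
  | [] => simp [pvChunk] at h
  | c :: cs =>
    simp only [pvChunk] at h
    split_ifs at h with h1 h2 h3 h4
    · rcases hd : cs.dropWhile (· != '\'') with _ | ⟨x, rest⟩ <;> simp [hd] at h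
      have hle : (x :: rest).length ≤ cs.length := hd ▸ cs.length_dropWhile_le _
      simp only [← h.2, List.length_cons] at hle ⊢
      omega
    · have := pvDqChunk_len cs.length cs le_rfl a r h
      simp only [List.length_cons]; omega
    · rcases cs with _ | ⟨d, ds⟩ <;> simp at h
      simp [← h.2]
    · have hws : pvShlexWS c = false := by simpa using h4
      have hcp : pvPlain c = true := by simp [pvPlain, hws, h1, h2, h3]
      simp at h
      have hr : r = List.dropWhile pvPlain cs := by
        rw [← h.2, List.dropWhile_cons, if_pos hcp]
      have hle := cs.length_dropWhile_le pvPlain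
      rw [hr]; simp only [List.length_cons]; omega

-- the (?:chunk)+ loop of one token match
def pvTokLoop (t s : List Char) : List Char × List Char :=
  match s with
  | [] => (t, [])
  | c :: cs =>
    if pvShlexWS c then (t, c :: cs)
    else
      match h : pvChunk (c :: cs) with
      | none => (t, c :: cs)
      | some (a, r) => pvTokLoop (t ++ a) r
termination_by s.length
decreasing_by exact pvChunk_len _ _ _ h

theorem pvTokLoop_eq_nil (t : List Char) : pvTokLoop t [] = (t, []) := by
  rw [pvTokLoop.eq_def]

theorem pvTokLoop_eq_ws (c : Char) (cs t : List Char) (h : pvShlexWS c = true) :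
    pvTokLoop t (c :: cs) = (t, c :: cs) := by
  rw [pvTokLoop.eq_def]; simp [h]

theorem pvTokLoop_eq_none (c : Char) (cs t : List Char) (h1 : pvShlexWS c = false)
    (h2 : pvChunk (c :: cs) = none) : pvTokLoop t (c :: cs) = (t, c :: cs) := by
  rw [pvTokLoop.eq_def]; simp only [h1, Bool.false_eq_true, if_false]
  split <;> simp_all

theorem pvTokLoop_eq_some (c : Char) (cs t a r : List Char) (h1 : pvShlexWS c = false)
    (h2 : pvChunk (c :: cs) = some (a, r)) : pvTokLoop t (c :: cs) = pvTokLoop (t ++ a) r := by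
  rw [pvTokLoop.eq_def]; simp only [h1, Bool.false_eq_true, if_false]
  split <;> simp_all

theorem pvTokLoop_len : ∀ (n : Nat) (s : List Char), s.length ≤ n →
    ∀ t t' rest, pvTokLoop t s = (t', rest) → rest.length ≤ s.length := by
  intro n
  induction n with
  | zero =>
    intro s h t t' rest hl
    have : s = [] := List.eq_nil_of_length_eq_zero (Nat.le_zero.mp h)
    subst this; rw [pvTokLoop_eq_nil] at hl
    simp [← (Prod.mk.injEq .. ▸ hl).2]
  | succ n ih =>
    intro s h t t' rest hl
    match s with
    | [] =>
      rw [pvTokLoop_eq_nil] at hl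
      simp [← (Prod.mk.injEq .. ▸ hl).2]
    | c :: cs =>
      by_cases hws : pvShlexWS c = true
      · rw [pvTokLoop_eq_ws c cs t hws] at hl
        simp [← (Prod.mk.injEq .. ▸ hl).2]
      · have hws' : pvShlexWS c = false := by simpa using hws
        rcases hc : pvChunk (c :: cs) with _ | ⟨a, r⟩
        · rw [pvTokLoop_eq_none c cs t hws' hc] at hl
          simp [← (Prod.mk.injEq .. ▸ hl).2]
        · rw [pvTokLoop_eq_some c cs t a r hws' hc] at hl
          have hcl := pvChunk_len _ _ _ hc
          have := ih r (by simp at h hcl ⊢; omega) (t ++ a) t' rest hl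
          simp at hcl ⊢
          omega

-- outer loop: skip whitespace, take one token (chunk+), repeat; `none` = malformed quoting
def pvBTok (s : List Char) : Option (List (List Char)) :=
  match s with
  | [] => some []
  | c :: cs =>
    if pvShlexWS c then pvBTok cs
    else
      match h : pvChunk (c :: cs) with
      | none => none
      | some (a, r) =>
        match h2 : pvTokLoop a r with
        | (t, rest) => (pvBTok rest).map (t :: ·)
termination_by s.length
decreasing_by
· simp
· have hcl := pvChunk_len _ _ _ h
  have := pvTokLoop_len r.length r le_rfl a t rest h2
  omega

-- B: tokens = _shell_tokens(raw) ; if None: tokens = str(raw).split()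
def pvTokenizeB (s : List Char) : List (List Char) :=
  match pvBTok s with
  | some ts => ts
  | none => PySem.Chars.split₀ s

-- B's loop body: one token at a time, with a pending-key state (some "type" / some "raw-format").
def pvBStep (st : Option (List Char) × List Char × List Char) (t : List Char) :
    Option (List Char) × List Char × List Char :=
  match st with
  | (some k, et, rf) =>
      let value := PySem.Chars.lower (PySem.Chars.strip t)
      if k = ("type" : String).toList then (none, pvOr value et, rf)
      else (none, et, pvOr value rf)
  | (none, et, rf) =>
      let low := PySem.Chars.lower t
      if PySem.Chars.startswith low ("--type=" : String).toList then
        (none, pvOr (PySem.Chars.lower (PySem.Chars.strip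
          (PySem.List.pyGetD (PySem.Chars.splitOnMax t ("=" : String).toList 1) 1 []))) et, rf)
      else if low = ("--type" : String).toList then (some ("type" : String).toList, et, rf)
      else if PySem.Chars.startswith low ("--raw-format=" : String).toList then
        (none, et, pvOr (PySem.Chars.lower (PySem.Chars.strip
          (PySem.List.pyGetD (PySem.Chars.splitOnMax t ("=" : String).toList 1) 1 []))) rf)
      else if low = ("--raw-format" : String).toList then (some ("raw-format" : String).toList, et, rf)
      else (none, et, rf)

def parse_campaign_export_options_py_alt (raw : Option String) : String × String :=
  match raw with
  | none => ("full", "jsonl")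
  | some s =>
    if s.toList = [] then ("full", "jsonl")
    else
      pvFinish ((List.foldl pvBStep (none, ("full" : String).toList, ("jsonl" : String).toList)
        (pvTokenizeB s.toList)).2)

-- ===== PRECONDITION & SPEC =====
def Spec_parse_campaign_export_options_py (raw : Option String) (out : String × String) : Prop := out = parse_campaign_export_options_py_alt raw
instance (raw : Option String) (out : String × String) : Decidable (Spec_parse_campaign_export_options_py raw out) := by unfold Spec_parse_campaign_export_options_py; infer_instance

-- ===== CLAIM (what is proved, stated in full; the proofs are below) =====
def Claim_equal_parse_campaign_export_options_py : Prop := ∀ (raw : Option String), Dom_parse_campaign_export_options_py raw → Spec_parse_campaign_export_options_py raw (parse_campaign_export_options_py raw)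

-- ===== LEMMAS AND PROOFS =====

theorem pvBTok_eq_nil : pvBTok [] = some [] := by
  rw [pvBTok.eq_def]

theorem pvBTok_eq_ws (c : Char) (cs : List Char) (h : pvShlexWS c = true) :
    pvBTok (c :: cs) = pvBTok cs := by
  rw [pvBTok.eq_def]; simp [h]

theorem pvBTok_eq_none (c : Char) (cs : List Char) (h1 : pvShlexWS c = false)
    (h2 : pvChunk (c :: cs) = none) : pvBTok (c :: cs) = none := by
  rw [pvBTok.eq_def]; simp only [h1, Bool.false_eq_true, if_false]
  split <;> simp_all

theorem pvBTok_eq_some (c : Char) (cs a r t rest : List Char) (h1 : pvShlexWS c = false)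
    (h2 : pvChunk (c :: cs) = some (a, r)) (h3 : pvTokLoop a r = (t, rest)) :
    pvBTok (c :: cs) = (pvBTok rest).map (t :: ·) := by
  rw [pvBTok.eq_def]; simp only [h1, Bool.false_eq_true, if_false]
  split
  · simp_all
  · rename_i a' r' heq
    rw [h2] at heq
    injection heq with heq
    injection heq with e1 e2; subst e1; subst e2
    simp only [h3]


-- ---- tokenizers agree: the shlex state machine equals B's chunk parser ----

theorem pvPlain_facts {c : Char} (h : pvPlain c = true) :
    pvShlexWS c = false ∧ c ≠ '\'' ∧ c ≠ '"' ∧ c ≠ '\\' := by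
  simp [pvPlain] at h; tauto

theorem pvPlain_run : ∀ (a : List Char), (∀ c ∈ a, pvPlain c = true) →
    ∀ (rest t : List Char) acc, pvShlex (a ++ rest) .norm (some t) acc = pvShlex rest .norm (some (t ++ a)) acc := by
  intro a
  induction a with
  | nil => intro _ rest t acc; simp
  | cons c a' ih =>
    intro hall rest t acc
    obtain ⟨hws, h1, h2, h3⟩ := pvPlain_facts (hall c (by simp))
    simp only [List.cons_append, pvShlex, hws, if_false, if_neg h3, if_neg h1, if_neg h2,
      Option.getD_some]
    rw [ih (fun c hc => hall c (by simp [hc])) rest (t ++ [c]) acc]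
    simp

theorem pvSq_run : ∀ (cs : List Char) (t : List Char) acc,
    pvShlex cs .sq (some t) acc =
      (match cs.dropWhile (· != '\'') with
       | [] => none
       | _ :: rest => pvShlex rest .norm (some (t ++ cs.takeWhile (· != '\''))) acc) := by
  intro cs
  induction cs with
  | nil => intro t acc; simp [pvShlex]
  | cons c cs' ih =>
    intro t acc
    by_cases hc : c = '\''
    · subst hc; simp [pvShlex, List.dropWhile_cons, List.takeWhile_cons]
    · simp only [pvShlex, if_neg hc, Option.getD_some, List.dropWhile_cons, List.takeWhile_cons,
        show ((c != '\'') = true) by simp [hc], if_pos]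
      rw [ih (t ++ [c]) acc]
      rcases cs'.dropWhile (· != '\'') with _ | ⟨x, rest⟩ <;> simp

theorem pvDq_run : ∀ (n : Nat) (cs : List Char), cs.length ≤ n → ∀ (t : List Char) acc,
    pvShlex cs .dq (some t) acc =
      (match pvDqChunk cs with
       | none => none
       | some (a, r) => pvShlex r .norm (some (t ++ a)) acc) := by
  intro n
  induction n with
  | zero =>
    intro cs h t acc
    have : cs = [] := List.eq_nil_of_length_eq_zero (Nat.le_zero.mp h)
    subst this; rw [pvDqChunk.eq_def]; simp [pvShlex]
  | succ n ih =>
    intro cs h t acc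
    match cs with
    | [] => rw [pvDqChunk.eq_def]; simp [pvShlex]
    | c :: cs' =>
      by_cases hq : c = '"'
      · subst hq; rw [pvDqChunk.eq_def]; simp [pvShlex]
      · by_cases hb : c = '\\'
        · subst hb
          match cs' with
          | [] => rw [pvDqChunk.eq_def]; simp [pvShlex]
          | d :: ds =>
            have step : pvShlex ('\\' :: d :: ds) .dq (some t) acc =
                pvShlex ds .dq (some (t ++ (if d = '"' ∨ d = '\\' then [d] else ['\\', d]))) acc := by
              by_cases hdc : d = '"' ∨ d = '\\' <;> simp [pvShlex, hdc]
            rw [step, ih ds (by simp at h ⊢; omega) _ acc,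
              show pvDqChunk ('\\' :: d :: ds) = (pvDqChunk ds).map
                  (fun p => ((if d = '"' ∨ d = '\\' then [d] else ['\\', d]) ++ p.1, p.2)) from by
                rw [pvDqChunk.eq_def]; simp]
            rcases hd : pvDqChunk ds with _ | ⟨a', r'⟩ <;> simp [hd]
        · have step : pvShlex (c :: cs') .dq (some t) acc =
              pvShlex cs' .dq (some (t ++ [c])) acc := by
            simp [pvShlex, hq, hb]
          rw [step, ih cs' (by simp at h ⊢; omega) _ acc,
            show pvDqChunk (c :: cs') = (pvDqChunk cs').map (fun p => (c :: p.1, p.2)) from by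
              rw [pvDqChunk.eq_def]; simp [hq, hb]]
          rcases hd : pvDqChunk cs' with _ | ⟨a', r'⟩ <;> simp [hd]

theorem pvChunk_step : ∀ (s a r : List Char), pvChunk s = some (a, r) →
    ∀ (t : List Char) acc, pvShlex s .norm (some t) acc = pvShlex r .norm (some (t ++ a)) acc := by
  intro s a r h t acc
  match s with
  | [] => simp [pvChunk] at h
  | c :: cs =>
    simp only [pvChunk] at h
    split_ifs at h with h1 h2 h3 h4
    · subst h1
      rcases hd : cs.dropWhile (· != '\'') with _ | ⟨x, rest⟩ <;> simp [hd] at h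
      rcases h with ⟨ha, hr⟩; subst ha; subst hr
      simp only [pvShlex, if_neg (by decide : pvShlexWS '\'' ≠ true),
        if_neg (by decide : ¬('\'' = '\\')), if_pos rfl, Option.getD_some]
      rw [pvSq_run cs t acc, hd]
      simp
    · subst h2
      simp only [pvShlex, if_neg (by decide : pvShlexWS '"' ≠ true),
        if_neg (by decide : ¬('"' = '\\')), if_neg (by decide : ¬('"' = '\'')), if_pos rfl,
        Option.getD_some]
      rw [pvDq_run cs.length cs le_rfl t acc, h]
      simp
    · subst h3
      rcases cs with _ | ⟨d, ds⟩ <;> simp at h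
      rcases h with ⟨ha, hr⟩; subst ha; subst hr
      simp [pvShlex, (by decide : pvShlexWS '\\' = false)]
    · simp at h
      obtain ⟨ha, hr⟩ := h
      subst ha; subst hr
      have hws : pvShlexWS c = false := by simpa using h4
      have hcp : pvPlain c = true := by simp [pvPlain, hws, h1, h2, h3]
      have hsplit : c :: cs = (c :: cs).takeWhile pvPlain ++ (c :: cs).dropWhile pvPlain :=
        (List.takeWhile_append_dropWhile).symm
      conv_lhs => rw [hsplit]
      exact pvPlain_run _ (fun x hx => List.mem_takeWhile_imp hx) _ t acc

theorem pvChunk_fail : ∀ (c : Char) (cs : List Char), pvShlexWS c = false →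
    pvChunk (c :: cs) = none → ∀ cur acc, pvShlex (c :: cs) .norm cur acc = none := by
  intro c cs hws h cur acc
  simp only [pvChunk] at h
  split_ifs at h with h1 h2 h3 h4
  · subst h1
    rcases hd : cs.dropWhile (· != '\'') with _ | ⟨x, rest⟩
    · simp only [pvShlex, if_neg (by decide : pvShlexWS '\'' ≠ true),
        if_neg (by decide : ¬('\'' = '\\')), if_pos rfl]
      rw [pvSq_run cs (cur.getD []) acc, hd]
      simp
    · simp [hd] at h
  · subst h2
    simp only [pvShlex, if_neg (by decide : pvShlexWS '"' ≠ true),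
      if_neg (by decide : ¬('"' = '\\')), if_neg (by decide : ¬('"' = '\'')), if_pos rfl]
    rw [pvDq_run cs.length cs le_rfl (cur.getD []) acc, h]
    simp
  · subst h3
    rcases cs with _ | ⟨d, ds⟩
    · simp [pvShlex, (by decide : pvShlexWS '\\' = false)]
    · simp at h
  · simp_all

-- entering a token: a `none` current token behaves as `some []`
theorem pvNorm_none (c : Char) (cs : List Char) (hws : pvShlexWS c = false) (acc : List (List Char)) :
    pvShlex (c :: cs) .norm none acc = pvShlex (c :: cs) .norm (some []) acc := by
  simp only [pvShlex, hws, if_false]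
  split_ifs <;> first | rfl | contradiction | (rcases cs with _ | ⟨e, es⟩ <;> simp [pvShlex])

theorem pvTokLoop_stop : ∀ (n : Nat) (s : List Char), s.length ≤ n →
    ∀ (t t' : List Char) (c : Char) (cs : List Char),
    pvTokLoop t s = (t', c :: cs) → pvShlexWS c = false → pvChunk (c :: cs) = none := by
  intro n
  induction n with
  | zero =>
    intro s h t t' c cs hl _
    have : s = [] := List.eq_nil_of_length_eq_zero (Nat.le_zero.mp h)
    subst this; rw [pvTokLoop_eq_nil] at hl
    exact absurd (Prod.mk.injEq .. ▸ hl).2 (by simp)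
  | succ n ih =>
    intro s h t t' c cs hl hws
    match s with
    | [] =>
      rw [pvTokLoop_eq_nil] at hl
      exact absurd (Prod.mk.injEq .. ▸ hl).2 (by simp)
    | c0 :: cs0 =>
      by_cases hw0 : pvShlexWS c0 = true
      · rw [pvTokLoop_eq_ws c0 cs0 t hw0] at hl
        obtain ⟨-, h2⟩ := Prod.mk.injEq .. ▸ hl
        injection h2 with e1 e2; subst e1
        simp_all
      · have hw0' : pvShlexWS c0 = false := by simpa using hw0
        rcases hc : pvChunk (c0 :: cs0) with _ | ⟨a, r⟩
        · rw [pvTokLoop_eq_none c0 cs0 t hw0' hc] at hl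
          obtain ⟨-, h2⟩ := Prod.mk.injEq .. ▸ hl
          injection h2 with e1 e2; subst e1; subst e2; exact hc
        · rw [pvTokLoop_eq_some c0 cs0 t a r hw0' hc] at hl
          have hcl := pvChunk_len _ _ _ hc
          exact ih r (by simp at h hcl ⊢; omega) (t ++ a) t' c cs hl hws

theorem pvTok_run : ∀ (n : Nat) (s : List Char), s.length ≤ n → ∀ (t : List Char) acc,
    pvShlex s .norm (some t) acc =
      (match pvTokLoop t s with
       | (t', []) => some (acc ++ [t'])
       | (t', c :: cs) =>
           if pvShlexWS c then pvShlex cs .norm none (acc ++ [t']) else none) := by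
  intro n
  induction n with
  | zero =>
    intro s h t acc
    have : s = [] := List.eq_nil_of_length_eq_zero (Nat.le_zero.mp h)
    subst this; simp [pvShlex, pvTokLoop_eq_nil, pvFlush]
  | succ n ih =>
    intro s h t acc
    match s with
    | [] => simp [pvShlex, pvTokLoop_eq_nil, pvFlush]
    | c :: cs =>
      by_cases hws : pvShlexWS c = true
      · rw [pvTokLoop_eq_ws c cs t hws]
        simp only [pvShlex, hws, if_true, pvFlush]
      · have hws' : pvShlexWS c = false := by simpa using hws
        rcases hc : pvChunk (c :: cs) with _ | ⟨a, r⟩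
        · rw [pvTokLoop_eq_none c cs t hws' hc]
          simp only
          rw [if_neg (by simp [hws']), pvChunk_fail c cs hws' hc]
        · rw [pvTokLoop_eq_some c cs t a r hws' hc, pvChunk_step _ _ _ hc t acc]
          exact ih r (by have := pvChunk_len _ _ _ hc; simp at this h ⊢; omega) (t ++ a) acc

theorem pvTok_main : ∀ (n : Nat) (s : List Char), s.length ≤ n → ∀ acc,
    pvShlex s .norm none acc = (pvBTok s).map (fun ts => acc ++ ts) := by
  intro n
  induction n with
  | zero =>
    intro s h acc
    have : s = [] := List.eq_nil_of_length_eq_zero (Nat.le_zero.mp h)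
    subst this
    rw [pvBTok_eq_nil]
    simp [pvShlex, pvFlush]
  | succ n ih =>
    intro s h acc
    match s with
    | [] =>
      rw [pvBTok_eq_nil]
      simp [pvShlex, pvFlush]
    | c :: cs =>
      by_cases hws : pvShlexWS c = true
      · rw [pvBTok_eq_ws c cs hws]
        simp only [pvShlex, hws, if_true, pvFlush]
        exact ih cs (by simp at h ⊢; omega) acc
      · have hws' : pvShlexWS c = false := by simpa using hws
        rcases hc : pvChunk (c :: cs) with _ | ⟨a, r⟩
        · rw [pvBTok_eq_none c cs hws' hc, pvNorm_none c cs hws' acc,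
            pvChunk_fail c cs hws' hc]
          simp
        · rcases hl : pvTokLoop a r with ⟨t', rest⟩
          rw [pvBTok_eq_some c cs a r t' rest hws' hc hl, pvNorm_none c cs hws' acc,
            pvChunk_step _ _ _ hc [] acc, pvTok_run r.length r le_rfl ([] ++ a) acc]
          have hl' : pvTokLoop ([] ++ a) r = (t', rest) := by simpa using hl
          simp only [hl']
          rcases rest with _ | ⟨d, ds⟩
          · simp [pvBTok_eq_nil]
          · by_cases hdw : pvShlexWS d = true
            · simp only [if_pos hdw]
              have hlen : ds.length ≤ n := by
                have h1 := pvTokLoop_len r.length r le_rfl a t' (d :: ds) hl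
                have h2 := pvChunk_len _ _ _ hc
                simp at h1 h2 h ⊢; omega
              rw [pvBTok_eq_ws d ds hdw, ih ds hlen (acc ++ [t'])]
              rcases pvBTok ds with _ | ts <;> simp
            · have hdw' : pvShlexWS d = false := by simpa using hdw
              simp only [if_neg hdw]
              have hcf : pvChunk (d :: ds) = none :=
                pvTokLoop_stop r.length r le_rfl a t' d ds hl hdw'
              rw [pvBTok_eq_none d ds hdw' hcf]
              simp

theorem pvTokenize_eq (s : List Char) : pvTokenize s = pvTokenizeB s := by
  unfold pvTokenize pvTokenizeB
  rw [pvTok_main s.length s le_rfl []]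
  rcases pvBTok s with _ | ts <;> simp

-- ---- A's index loop equals B's pending-key fold, from any state ----
theorem pvLoop_eq (n : Nat) :
    ∀ (ts : List (List Char)) (et rf : List Char), ts.length ≤ n →
      pvALoop ts et rf = (List.foldl pvBStep (none, et, rf) ts).2 := by
  induction n with
  | zero =>
    intro ts et rf h
    have : ts = [] := List.eq_nil_of_length_eq_zero (Nat.le_zero.mp h)
    subst this; simp [pvALoop]
  | succ n ih =>
    intro ts et rf h
    match ts with
    | [] => simp [pvALoop]
    | [t] =>
      simp only [pvALoop, List.foldl_cons, List.foldl_nil, pvBStep]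
      split_ifs <;> rfl
    | t :: v :: rest' =>
      have hr : (v :: rest').length ≤ n := by simpa using h
      have hr' : rest'.length ≤ n := by simp at hr ⊢; omega
      simp only [pvALoop, List.foldl_cons]
      split_ifs with h1 h2 h3 h4
      · rw [show pvBStep (none, et, rf) t = (none,
            pvOr (PySem.Chars.lower (PySem.Chars.strip
              (PySem.List.pyGetD (PySem.Chars.splitOnMax t ("=" : String).toList 1) 1 []))) et, rf) by
          simp only [pvBStep]; rw [if_pos h1]]
        exact ih _ _ _ hr
      · rw [show pvBStep (none, et, rf) t = (some ("type" : String).toList, et, rf) by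
          simp only [pvBStep]; rw [if_neg h1, if_pos h2],
          show pvBStep (some ("type" : String).toList, et, rf) v =
            (none, pvOr (PySem.Chars.lower (PySem.Chars.strip v)) et, rf) by
              simp only [pvBStep]; rw [if_true]]
        exact ih _ _ _ hr'
      · rw [show pvBStep (none, et, rf) t = (none, et,
            pvOr (PySem.Chars.lower (PySem.Chars.strip
              (PySem.List.pyGetD (PySem.Chars.splitOnMax t ("=" : String).toList 1) 1 []))) rf) by
          simp only [pvBStep]; rw [if_neg h1, if_neg h2, if_pos h3]]
        exact ih _ _ _ hr
      · rw [show pvBStep (none, et, rf) t = (some ("raw-format" : String).toList, et, rf) by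
          simp only [pvBStep]; rw [if_neg h1, if_neg h2, if_neg h3, if_pos h4],
          show pvBStep (some ("raw-format" : String).toList, et, rf) v =
            (none, et, pvOr (PySem.Chars.lower (PySem.Chars.strip v)) rf) by
              simp only [pvBStep]; rw [if_neg (by simp)]]
        exact ih _ _ _ hr'
      · rw [show pvBStep (none, et, rf) t = (none, et, rf) by simp only [pvBStep]; rw [if_neg h1, if_neg h2, if_neg h3, if_neg h4]]
        exact ih _ _ _ hr

-- ===== VERDICT (by name: the statement is the Claim_ definition above) =====
theorem parse_campaign_export_options_py_spec : Claim_equal_parse_campaign_export_options_py := by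
  intro raw _
  unfold Spec_parse_campaign_export_options_py
  match raw with
  | none => rfl
  | some s =>
    simp only [parse_campaign_export_options_py, parse_campaign_export_options_py_alt]
    split_ifs with hs
    · rfl
    · rw [pvTokenize_eq, pvLoop_eq (pvTokenizeB s.toList).length _ _ _ le_rfl]
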